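-- pv_equiv track=rewrite | github.com/hazylua/py-improc-cellular-automaton | matrix.py | y_symmetry
-- ===== SOURCE A (Python) =====
-- from math import ceil
--
-- def y_symmetry(matrix):
--     """ Get reflection of matrix in the y-axis. """
--     # sym_matrix = copy.deepcopy(matrix)
--     sym_matrix = [x[:] for x in matrix]
--     width = len(sym_matrix[0])
--     start = ceil(width/2)
--     reflect = start - 1 - width % 2
--     for i in range(start, width):
--         reflect_column = get_column(sym_matrix, reflect)
--         sym_matrix = set_column(sym_matrix, i, reflect_column)
--         reflect -= 1
--     return sym_matrix
--
-- def get_column(matrix, i):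
--     """ Return column of matrix. """
--     return [row[i] for row in matrix]
--
-- def set_column(m, i, v):
--     """ Return matrix with a replaced column. """
--     for x, row in enumerate(m):
--         row[i] = v[x]
--     return m
-- ===== SOURCE B (Python) =====
-- from math import ceil
--
-- def y_symmetry(matrix):
--     """ Get reflection of matrix in the y-axis.
--
--     Mirrors the left half of the first `width` columns onto the right half,
--     row by row; any columns beyond `width` are kept unchanged. """
--     width = len(matrix[0])
--     start = ceil(width / 2)
--     keep = start - width % 2
--     return [row[:start] + row[:keep][::-1] + row[width:] for row in matrix]
-- ===== Notes on version B (the rewrite author's own statement) =====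
-- stated objective: simpler
-- what changed: Replaces A's column-by-column get_column/set_column rewriting loop with a single row-wise pass that builds each new row as left-half slice plus its reverse (plus any untouched trailing columns).
import Mathlib
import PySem

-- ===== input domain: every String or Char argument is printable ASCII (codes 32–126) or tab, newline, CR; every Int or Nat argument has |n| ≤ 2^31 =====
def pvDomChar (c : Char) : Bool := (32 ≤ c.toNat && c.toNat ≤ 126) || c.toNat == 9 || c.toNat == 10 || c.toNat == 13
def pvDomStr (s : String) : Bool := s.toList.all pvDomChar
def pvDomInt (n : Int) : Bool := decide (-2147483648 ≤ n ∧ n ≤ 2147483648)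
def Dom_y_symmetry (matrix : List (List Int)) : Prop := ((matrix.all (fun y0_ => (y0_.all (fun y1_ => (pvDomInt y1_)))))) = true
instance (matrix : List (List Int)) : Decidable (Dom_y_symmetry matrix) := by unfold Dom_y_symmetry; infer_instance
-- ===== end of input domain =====

-- B builds each mirrored row with one slice-and-reverse pass instead of A's column-by-column
-- get_column/set_column writes; objective: simpler. A mutates its fresh row copies only, never the argument.

-- ===== PORT A =====
-- get_column(matrix, i): [row[i] for row in matrix]  (row[i] in range under Pre_)
def get_column (matrix : List (List Int)) (i : Int) : List Int :=
  matrix.map (fun row => (PySem.List.pyGet? row i).getD 0)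

-- set_column(m, i, v): for x, row in enumerate(m): row[i] = v[x]; return m
def set_column (m : List (List Int)) (i : Int) (v : List Int) : List (List Int) :=
  (PySem.List.enumerate m).map (fun p => PySem.List.pySetD p.2 i ((PySem.List.pyGet? v p.1).getD 0))

def y_symmetry (matrix : List (List Int)) : List (List Int) :=
  let sym0 := matrix.map (fun x => PySem.List.slice x none none)   -- x[:]
  let width : Int := ((sym0.headD []).length : Int)                -- len(sym_matrix[0]); [] excluded by Pre_
  let start : Int := -(PySem.Int.floordiv (-width) 2)              -- ceil(width/2), exact ceiling division
  let st := (PySem.List.pyRange start width 1).foldl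
      (fun (st : List (List Int) × Int) i =>
        (set_column st.1 i (get_column st.1 st.2), st.2 - 1))
      (sym0, start - 1 - PySem.Int.mod width 2)
  st.1

-- ===== PORT B =====
def y_symmetry_alt (matrix : List (List Int)) : List (List Int) :=
  let width : Int := ((matrix.headD []).length : Int)              -- len(matrix[0]); [] excluded by Pre_
  let start : Int := -(PySem.Int.floordiv (-width) 2)              -- ceil(width/2)
  let keep : Int := start - PySem.Int.mod width 2
  matrix.map (fun row =>
    PySem.List.slice row none (some start) ++
    (PySem.List.slice row none (some keep)).reverse ++
    PySem.List.slice row (some width) none)   -- row[:start] + row[:keep][::-1] + row[width:]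

-- ===== PRECONDITION & SPEC =====
-- Pre_ excludes exactly the inputs on which A raises IndexError: the empty matrix (matrix[0]),
-- and matrices of width ≥ 2 where some row is shorter than the first row (row[i] out of range;
-- for width ≤ 1 A's loop body never runs, so A returns and is claimed).
def Pre_y_symmetry (matrix : List (List Int)) : Prop :=
  matrix ≠ [] ∧ ((matrix.headD []).length ≤ 1 ∨ ∀ row ∈ matrix, (matrix.headD []).length ≤ row.length)
instance (matrix : List (List Int)) : Decidable (Pre_y_symmetry matrix) := by
  unfold Pre_y_symmetry; infer_instance

def pvWitness_y_symmetry : List (List Int) := [[1, 2, 3], [4, 5, 6]]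

def Spec_y_symmetry (matrix : List (List Int)) (out : List (List Int)) : Prop := out = y_symmetry_alt matrix
instance (matrix : List (List Int)) (out : List (List Int)) : Decidable (Spec_y_symmetry matrix out) := by unfold Spec_y_symmetry; infer_instance

-- ===== CLAIM (what is proved, stated in full; the proofs are below) =====
def Claim_equal_y_symmetry : Prop := ∀ (matrix : List (List Int)), Dom_y_symmetry matrix → Pre_y_symmetry matrix → Spec_y_symmetry matrix (y_symmetry matrix)

-- ===== LEMMAS AND PROOFS =====

-- B's row function over Nat bounds (w = s + k is the first row's width; longer rows keep their tail).
def altRow (s k w : Nat) (r : List Int) : List Int := r.take s ++ (r.take k).reverse ++ r.drop w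

-- Partially rewritten row: first i entries final, rest original (for s ≤ i ≤ w).
def phiRow (s k w : Nat) (i : Nat) (r : List Int) : List Int := (altRow s k w r).take i ++ r.drop i

-- ceil(w/2) via floor division equals Nat (w+1)/2
theorem ceil_half (w : Nat) : -(PySem.Int.floordiv (-(w : Int)) 2) = (((w + 1) / 2 : Nat) : Int) := by
  rw [PySem.Int.neg_floordiv_neg_eq_iff_of_pos (by omega)]
  constructor <;> push_cast <;> omega

theorem length_altRow (w s k : Nat) (hs : s ≤ w) (hk : k ≤ w) (hsk : s + k = w)
    (r : List Int) (hr : w ≤ r.length) : (altRow s k w r).length = r.length := by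
  simp [altRow]; omega

theorem altRow_take_w (w s k : Nat) (hs : s ≤ w) (_hk : k ≤ w) (hsk : s + k = w)
    (r : List Int) (hr : w ≤ r.length) :
    (altRow s k w r).take w = r.take s ++ (r.take k).reverse := by
  have h1 : (r.take s ++ (r.take k).reverse).length = w := by simp; omega
  rw [altRow, List.take_append_of_le_length (le_of_eq h1.symm)]
  rw [List.take_of_length_le (le_of_eq h1)]

theorem phiRow_zero_eq (w s k : Nat) (hs : s ≤ w) (_hks : k ≤ s)
    (r : List Int) (hr : w ≤ r.length) : phiRow s k w s r = r := by
  have h1 : (r.take s).length = s := by simp; omega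
  have : (altRow s k w r).take s = r.take s := by
    rw [altRow, List.append_assoc, List.take_append_of_le_length (by omega)]
    rw [List.take_of_length_le (by omega)]
  simp [phiRow, this, List.take_append_drop]

theorem phiRow_top_eq (w s k : Nat) (hs : s ≤ w) (hk : k ≤ w) (hsk : s + k = w)
    (r : List Int) (hr : w ≤ r.length) : phiRow s k w w r = altRow s k w r := by
  rw [phiRow, altRow_take_w w s k hs hk hsk r hr, altRow]

theorem length_phiRow (w s k : Nat) (hs : s ≤ w) (hk : k ≤ w) (hsk : s + k = w)
    (i : Nat) (hi : i ≤ w) (r : List Int) (hr : w ≤ r.length) :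
    (phiRow s k w i r).length = r.length := by
  have hl := length_altRow w s k hs hk hsk r hr
  simp [phiRow, hl]; omega

theorem length_set_column (m : List (List Int)) (i : Int) (v : List Int) :
    (set_column m i v).length = m.length := by
  simp [set_column, PySem.List.length_enumerate]

theorem set_column_map (matrix : List (List Int)) (f : List Int → List Int) (i j : Int) :
    set_column (matrix.map f) i (get_column (matrix.map f) j)
      = matrix.map (fun r => PySem.List.pySetD (f r) i ((PySem.List.pyGet? (f r) j).getD 0)) := by
  apply List.ext_getElem
  · simp [length_set_column]
  · intro x h1 h2
    simp only [set_column, get_column, List.getElem_map, PySem.List.getElem_enumerate]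
    have hx : x < (matrix.map f).length := by simpa using h2
    have hx2 : x < matrix.length := by simpa using hx
    rw [show ((0 : Int) + x) = ((x : Nat) : Int) by omega, PySem.List.pyGet?_natCast]
    simp [List.getElem?_eq_getElem hx2]

-- the element read at step n is r[n] (n < s ≤ i)
theorem phiRow_read (w s k : Nat) (hs : s ≤ w) (hk : k ≤ w) (hsk : s + k = w)
    (i n : Nat) (hsi : s ≤ i) (hi : i ≤ w) (hn : n < s)
    (r : List Int) (hr : w ≤ r.length) :
    (PySem.List.pyGet? (phiRow s k w i r) ((n : Nat) : Int)).getD 0 = r.getD n 0 := by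
  have hl := length_altRow w s k hs hk hsk r hr
  have hlp := length_phiRow w s k hs hk hsk i hi r hr
  have hn' : n < (phiRow s k w i r).length := by omega
  rw [PySem.List.pyGet?_natCast]
  have hna : n < ((altRow s k w r).take i).length := by simp [hl]; omega
  have : (phiRow s k w i r)[n] = r[n]'(by omega) := by
    simp only [phiRow]
    rw [List.getElem_append_left hna, List.getElem_take]
    simp only [altRow, List.append_assoc]
    have hnt : n < (r.take s).length := by simp; omega
    rw [List.getElem_append_left hnt, List.getElem_take]
  simp [List.getElem?_eq_getElem hn', this, List.getD_eq_getElem?_getD,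
    List.getElem?_eq_getElem (show n < r.length by omega)]

-- one loop step advances phiRow i to phiRow (i+1)
theorem phiRow_step (w s k : Nat) (hs : s ≤ w) (hk : k ≤ w) (hsk : s + k = w) (hks : k ≤ s)
    (i n : Nat) (hsi : s ≤ i) (hi : i < w) (hin : i = s + (k - 1 - n)) (hnk : n < k)
    (r : List Int) (hr : w ≤ r.length) :
    PySem.List.pySetD (phiRow s k w i r) ((i : Nat) : Int)
        ((PySem.List.pyGet? (phiRow s k w i r) ((n : Nat) : Int)).getD 0)
      = phiRow s k w (i + 1) r := by
  have hl := length_altRow w s k hs hk hsk r hr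
  rw [phiRow_read w s k hs hk hsk i n hsi (by omega) (by omega) r hr]
  rw [PySem.List.pySetD_natCast]
  have hti : ((altRow s k w r).take i).length = i := by simp [hl]; omega
  have hdrop : r.drop i = r[i]'(by omega) :: r.drop (i + 1) := by
    rw [List.drop_eq_getElem_cons (by omega)]
  have hval : (altRow s k w r)[i]'(by omega) = r[n]'(by omega) := by
    have hw := altRow_take_w w s k hs hk hsk r hr
    have hiw : i < ((altRow s k w r).take w).length := by simp [hl]; omega
    have : (altRow s k w r)[i]'(by omega) = ((altRow s k w r).take w)[i]'hiw := by
      rw [List.getElem_take]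
    rw [this]
    simp only [hw]
    have hlen : (r.take s).length = s := by simp; omega
    have h1 : (r.take s).length ≤ i := by omega
    rw [List.getElem_append_right h1]
    rw [List.getElem_reverse]
    rw [List.getElem_take]
    congr 1
    have hlk : (r.take k).length = k := by simp; omega
    simp [hlen, hlk]; omega
  have htake : (altRow s k w r).take (i + 1) = (altRow s k w r).take i ++ [r[n]'(by omega)] := by
    rw [List.take_add_one, List.getElem?_eq_getElem (by omega)]
    simp [hval]
  calc ((altRow s k w r).take i ++ r.drop i).set i (r.getD n 0)
      = (altRow s k w r).take i ++ ((r.drop i).set 0 (r.getD n 0)) := by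
        rw [List.set_append_right _ _ (by omega)]
        simp [hti]
    _ = phiRow s k w (i + 1) r := by
        rw [hdrop]
        simp only [List.set_cons_zero, phiRow, htake]
        have : r.getD n 0 = r[n]'(by omega) := by
          simp [List.getD_eq_getElem?_getD, List.getElem?_eq_getElem (show n < r.length by omega)]
        rw [this, List.append_assoc]
        rfl

-- the loop invariant: with n mirror-writes remaining (at column w-n), the fold finishes the map
theorem loop_inv (w s k : Nat) (hs : s ≤ w) (hk : k ≤ w) (hsk : s + k = w) (hks : k ≤ s)
    (matrix : List (List Int)) (hw : ∀ r ∈ matrix, w ≤ r.length) :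
    ∀ n, n ≤ k →
      ((PySem.List.pyRange (((w - n : Nat) : Nat) : Int) ((w : Nat) : Int) 1).foldl
        (fun (st : List (List Int) × Int) i =>
          (set_column st.1 i (get_column st.1 st.2), st.2 - 1))
        (matrix.map (phiRow s k w (w - n)), ((n : Nat) : Int) - 1)).1
      = matrix.map (altRow s k w) := by
  intro n
  induction n generalizing matrix with
  | zero =>
    intro _
    rw [PySem.List.pyRange_one_eq_nil (by simp)]
    simp only [List.foldl_nil]
    exact List.map_congr_left (fun r hr => by
      simpa using phiRow_top_eq w s k hs hk hsk r (hw r hr))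
  | succ n ih =>
    intro hnk
    have hi : w - (n+1) < w := by omega
    rw [PySem.List.pyRange_one_cons (by exact_mod_cast hi)]
    simp only [List.foldl_cons]
    rw [set_column_map]
    have hrd : (((n+1) : Nat) : Int) - 1 = ((n : Nat) : Int) := by push_cast; omega
    have hmap : (matrix.map fun r =>
        PySem.List.pySetD (phiRow s k w (w - (n+1)) r) (((w - (n+1) : Nat) : Nat) : Int)
          ((PySem.List.pyGet? (phiRow s k w (w - (n+1)) r) ((n : Nat) : Int)).getD 0))
        = matrix.map (phiRow s k w (w - n)) := by
      apply List.map_congr_left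
      intro r hr
      have := phiRow_step w s k hs hk hsk hks (w - (n+1)) n (by omega) hi (by omega) (by omega)
        r (hw r hr)
      rw [this]
      congr 1
      omega
    have hcast : (((w - (n+1) : Nat) : Nat) : Int) + 1 = (((w - n : Nat) : Nat) : Int) := by
      omega
    rw [hrd] at *
    rw [hmap, hcast]
    exact ih matrix hw (by omega)

theorem y_symmetry_spec' (matrix : List (List Int)) (hp : Pre_y_symmetry matrix) :
    y_symmetry matrix = y_symmetry_alt matrix := by
  obtain ⟨hne, hcond⟩ := hp
  obtain ⟨r0, rs, rfl⟩ := List.exists_cons_of_ne_nil hne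
  set M := r0 :: rs with hM
  set w : Nat := r0.length with hw0
  have hhead : (M.headD []).length = w := by simp [hM, hw0]
  set s : Nat := (w + 1) / 2 with hs0
  set k : Nat := s - w % 2 with hk0
  have hs : s ≤ w := by omega
  have hsk : s + k = w := by omega
  have hk : k ≤ w := by omega
  have hks : k ≤ s := by omega
  have hsym : M.map (fun x => PySem.List.slice x none none) = M := by
    simp [PySem.List.slice_none_none]
  have hstart : -(PySem.Int.floordiv (-((w : Nat) : Int)) 2) = ((s : Nat) : Int) := ceil_half w
  have hmod : PySem.Int.mod ((w : Nat) : Int) 2 = ((w % 2 : Nat) : Int) :=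
    PySem.Int.mod_natCast w 2
  have hival : ((s : Nat) : Int) - 1 - ((w % 2 : Nat) : Int) = ((k : Nat) : Int) - 1 := by
    omega
  have hscast : ((s : Nat) : Int) = (((w - k : Nat) : Nat) : Int) := by omega
  rcases hcond with hsmall | hrect
  · -- width ≤ 1: A's mirroring loop is empty and B rebuilds each row unchanged
    have hw1 : w ≤ 1 := hhead ▸ hsmall
    have hsw : ((s : Nat) : Int) = ((w : Nat) : Int) := by omega
    simp only [y_symmetry, y_symmetry_alt]
    rw [hsym, hhead, hstart, hmod, hsw, PySem.List.pyRange_one_eq_nil (le_refl _)]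
    simp only [List.foldl_nil]
    have hrow : ∀ r ∈ M, (PySem.List.slice r none (some ((w : Nat) : Int)) ++
        (PySem.List.slice r none (some (((w : Nat) : Int) - ((w % 2 : Nat) : Int)))).reverse ++
        PySem.List.slice r (some ((w : Nat) : Int)) none) = r := by
      intro r hr
      have hk2 : ((w : Nat) : Int) - ((w % 2 : Nat) : Int) = ((k : Nat) : Int) := by omega
      have hk0' : k = 0 := by omega
      rw [hk2, PySem.List.slice_to_natCast, PySem.List.slice_to_natCast,
        PySem.List.slice_from_natCast]
      simp [hk0']
    exact ((List.map_congr_left hrow).trans (List.map_id M)).symm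
  have hrows : ∀ r ∈ M, w ≤ r.length := by
    intro r hr
    have := hrect r hr
    rw [hhead] at this
    exact this
  have hinit : M.map (phiRow s k w (w - k)) = M := by
    have hws : w - k = s := by omega
    rw [hws]
    calc M.map (phiRow s k w s)
        = M.map id := List.map_congr_left (fun r hr => phiRow_zero_eq w s k hs hks r (hrows r hr))
      _ = M := List.map_id M
  have hA : ((PySem.List.pyRange ((s : Nat) : Int) ((w : Nat) : Int) 1).foldl
        (fun (st : List (List Int) × Int) i =>
          (set_column st.1 i (get_column st.1 st.2), st.2 - 1))
        (M, ((s : Nat) : Int) - 1 - ((w % 2 : Nat) : Int))).1 = M.map (altRow s k w) := by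
    have h0 := loop_inv w s k hs hk hsk hks M hrows k (le_refl k)
    rw [hinit] at h0
    rw [hival, hscast]
    exact h0
  have hB : y_symmetry_alt M = M.map (altRow s k w) := by
    simp only [y_symmetry_alt]
    rw [hhead, hstart, hmod]
    apply List.map_congr_left
    intro r hr
    have hkeep : ((s : Nat) : Int) - ((w % 2 : Nat) : Int) = ((k : Nat) : Int) := by omega
    rw [hkeep, PySem.List.slice_to_natCast, PySem.List.slice_to_natCast,
      PySem.List.slice_from_natCast]
    rfl
  simp only [y_symmetry]
  rw [hsym, hhead, hstart, hmod, hA, hB]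

-- ===== VERDICT (by name: the statement is the Claim_ definition above) =====
theorem y_symmetry_spec : Claim_equal_y_symmetry := by
  intro matrix _ hp
  unfold Spec_y_symmetry
  exact y_symmetry_spec' matrix hp
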